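-- pv_equiv track=rewrite | github.com/belozersky321/PhyloBench | consense-ncbi.py | readnewick
-- ===== SOURCE A (Python) =====
-- def extractnames(newick):
--   name = ""
--   names = frozenset()
--   mode = True
--   for i in range(len(newick)):
--     if newick[i] == ':': mode = False
--     if newick[i] in "(),":
--       mode = True
--       if name:
--         names = names | frozenset([name])
--       name = ""
--     if mode and (newick[i] not in "(),:;") and not newick[i].isspace():
--       name += newick[i]
--   if name: names = names | frozenset([name])
--   return names
--
-- def readnewick(newick):
--   result = frozenset()
--   allnames = extractnames(newick)
--   for name in allnames:
--     left = frozenset([name])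
--     right = allnames - left
--     result = result | frozenset([(left, right)]) # add trivial branches
--   stack = list()
--   for i in range(len(newick)):
--     if newick[i] == '(':
--       stack.append(i)
--     if newick[i] == ')':
--       j = stack.pop()
--       left = extractnames(newick[j:i]) # all names in the pair of brackets
--       right = allnames - left
--       result = result | frozenset([(left, right)]) # non-trivial branch
--   return result
-- ===== SOURCE B (Python) =====
-- def readnewick(newick):
--   # single pass: token list + stack of token-count marks; no substring rescans
--   toks = []
--   stack = []
--   splits = []
--   name = ""
--   mode = True
--   for ch in newick:
--     if ch == ':':
--       mode = False
--     if ch in "(),":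
--       mode = True
--       if name:
--         toks.append(name)
--       name = ""
--       if ch == '(':
--         stack.append(len(toks))
--       elif ch == ')':
--         splits.append(frozenset(toks[stack.pop():]))
--     elif mode and ch not in ":;" and not ch.isspace():
--       name += ch
--   if name:
--     toks.append(name)
--   allnames = frozenset(toks)
--   result = {(frozenset([nm]), allnames - frozenset([nm])) for nm in allnames}
--   for left in splits:
--     result.add((left, allnames - left))
--   return frozenset(result)
-- ===== Notes on version B (the rewrite author's own statement) =====
-- stated objective: faster
-- what changed: A rescans the whole substring between every matching bracket pair with extractnames (O(len) work per ')'); B makes one left-to-right pass that appends each flushed token to a single token list and marks each '(' with the current token count, so each ')' just takes the token-list suffix from its mark - no substring is ever rescanned.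
import Mathlib
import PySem

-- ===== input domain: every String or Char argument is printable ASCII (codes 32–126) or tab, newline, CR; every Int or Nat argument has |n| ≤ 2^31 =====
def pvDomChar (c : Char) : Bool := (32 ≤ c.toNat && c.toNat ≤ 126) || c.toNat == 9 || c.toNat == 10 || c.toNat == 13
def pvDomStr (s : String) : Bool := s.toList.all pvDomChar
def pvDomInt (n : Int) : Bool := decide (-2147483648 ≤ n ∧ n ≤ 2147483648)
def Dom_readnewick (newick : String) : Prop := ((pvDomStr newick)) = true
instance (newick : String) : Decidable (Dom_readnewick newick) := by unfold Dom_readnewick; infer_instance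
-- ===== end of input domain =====

-- B replaces A's O(len) substring rescan (extractnames of newick[j:i]) at every ')' by a single
-- left-to-right pass that records tokens once and marks each '(' with a token count (objective: faster).

-- ===== PORT A =====
-- character classes of A's tokenizer, shared by both ports
def pvDelim (c : Char) : Bool := c == '(' || c == ')' || c == ','
def pvKeep (c : Char) : Bool :=
  !(pvDelim c || c == ':' || c == ';') && !(PySem.Chars.isspace c)

-- one iteration of extractnames' loop; state = (name, names, mode)
def enStep (st : List Char × PySem.Set String × Bool) (c : Char) :
    List Char × PySem.Set String × Bool :=
  let mode := if c == ':' then false else st.2.2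
  let name := st.1
  let names := st.2.1
  let (name, names, mode) :=
    if pvDelim c then
      ([], if name.isEmpty then names else PySem.Set.add names (String.ofList name), true)
    else (name, names, mode)
  if mode && pvKeep c then (name ++ [c], names, mode) else (name, names, mode)

def extractnames (cs : List Char) : PySem.Set String :=
  let r := cs.foldl enStep ([], [], true)
  if r.1.isEmpty then r.2.1 else PySem.Set.add r.2.1 (String.ofList r.1)

-- one iteration of readnewick's second loop; state = (stack, result), ci = (newick[i], i)
def rnStep (cs : List Char) (all : PySem.Set String)
    (st : List Nat × PySem.Set (List String × List String)) (ci : Char × Nat) :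
    List Nat × PySem.Set (List String × List String) :=
  let stack := if ci.1 == '(' then ci.2 :: st.1 else st.1
  if ci.1 == ')' then
    match stack with
    | [] => (stack, st.2)      -- Python raises IndexError here; excluded by Pre_readnewick
    | j :: rest =>
        -- newick[j:i]: exact as take/drop since 0 ≤ j ≤ i ≤ len here
        let left := extractnames ((cs.drop j).take (ci.2 - j))
        (rest, PySem.Set.add st.2 (left, PySem.Set.diff all left))
  else (stack, st.2)

def readnewick (newick : String) : List (List String × List String) :=
  let cs := newick.toList
  let all := extractnames cs
  let result := all.foldl (fun r nm => PySem.Set.add r ([nm], PySem.Set.diff all [nm])) []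
  (cs.zipIdx.foldl (rnStep cs all) ([], result)).2

-- ===== PORT B =====
structure BSt where
  name : List Char
  mode : Bool
  toks : List String
  stack : List Nat
  splits : List (List String)

def bStep (st : BSt) (c : Char) : BSt :=
  let mode := if c == ':' then false else st.mode
  if pvDelim c then
    let toks := if st.name.isEmpty then st.toks else st.toks ++ [String.ofList st.name]
    if c == '(' then ⟨[], true, toks, toks.length :: st.stack, st.splits⟩
    else if c == ')' then
      match st.stack with
      | [] => ⟨[], true, toks, [], st.splits⟩   -- Python raises IndexError here; excluded by Pre_readnewick
      | s :: rest => ⟨[], true, toks, rest, st.splits ++ [PySem.Set.ofList (toks.drop s)]⟩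
    else ⟨[], true, toks, st.stack, st.splits⟩
  else if mode && pvKeep c then ⟨st.name ++ [c], mode, st.toks, st.stack, st.splits⟩
  else ⟨st.name, mode, st.toks, st.stack, st.splits⟩

def readnewick_alt (newick : String) : List (List String × List String) :=
  let st := newick.toList.foldl bStep ⟨[], true, [], [], []⟩
  let toks := if st.name.isEmpty then st.toks else st.toks ++ [String.ofList st.name]
  let all := PySem.Set.ofList toks
  let result := all.foldl (fun r nm => PySem.Set.add r ([nm], PySem.Set.diff all [nm])) []
  st.splits.foldl (fun r left => PySem.Set.add r (left, PySem.Set.diff all left)) result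

-- ===== PRECONDITION & SPEC =====
-- Pre_ excludes exactly the strings with a prefix containing more ')' than '(' — there
-- Python A raises IndexError on stack.pop() (and B raises the same way).
def Pre_readnewick (newick : String) : Prop :=
  ∀ k ∈ List.range (newick.toList.length + 1),
    (newick.toList.take k).count ')' ≤ (newick.toList.take k).count '('
instance (newick : String) : Decidable (Pre_readnewick newick) := by
  unfold Pre_readnewick; infer_instance

def pvWitness_readnewick : String := "(a,(b,c));"

def Spec_readnewick (newick : String) (out : List (List String × List String)) : Prop := out = readnewick_alt newick
instance (newick : String) (out : List (List String × List String)) : Decidable (Spec_readnewick newick out) := by unfold Spec_readnewick; infer_instance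

-- ===== CLAIM (what is proved, stated in full; the proofs are below) =====
def Claim_equal_readnewick : Prop := ∀ (newick : String), Dom_readnewick newick → Pre_readnewick newick → Spec_readnewick newick (readnewick newick)

-- ===== LEMMAS AND PROOFS =====

-- tokenizer model shared by the two characterizations: state = (pending name, mode)
def tkStep (st : List Char × Bool) (c : Char) : List Char × Bool :=
  let mode := if c == ':' then false else st.2
  if pvDelim c then ([], true)
  else if mode && pvKeep c then (st.1 ++ [c], mode)
  else (st.1, mode)

def tks (cs : List Char) (st : List Char × Bool) : List Char × Bool := cs.foldl tkStep st

-- the token (if any) flushed by processing c in state st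
def emitC (st : List Char × Bool) (c : Char) : List String :=
  if pvDelim c && !st.1.isEmpty then [String.ofList st.1] else []

def emit : List Char → (List Char × Bool) → List String
  | [], _ => []
  | c :: cs, st => emitC st c ++ emit cs (tkStep st c)

def flushT (st : List Char × Bool) : List String :=
  if st.1.isEmpty then [] else [String.ofList st.1]

def emitAll (cs : List Char) : List String :=
  emit cs ([], true) ++ flushT (tks cs ([], true))

lemma emitC_delim {c : Char} (h : pvDelim c = true) (st : List Char × Bool) :
    emitC st c = flushT st := by
  simp only [emitC, flushT, h, Bool.true_and]
  cases hn : st.1.isEmpty <;> simp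

lemma emitC_not_delim {c : Char} (h : pvDelim c = false) (st : List Char × Bool) :
    emitC st c = [] := by simp [emitC, h]

lemma emit_append (xs ys : List Char) (st : List Char × Bool) :
    emit (xs ++ ys) st = emit xs st ++ emit ys (tks xs st) := by
  induction xs generalizing st with
  | nil => simp [emit, tks]
  | cons c cs ih => simp [emit, tks, ih, List.foldl_cons]

lemma tks_append (xs ys : List Char) (st : List Char × Bool) :
    tks (xs ++ ys) st = tks ys (tks xs st) := by
  simp [tks, List.foldl_append]

lemma emit_snoc (xs : List Char) (c : Char) (st : List Char × Bool) :
    emit (xs ++ [c]) st = emit xs st ++ emitC (tks xs st) c := by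
  rw [emit_append]; simp [emit]

lemma tks_snoc (xs : List Char) (c : Char) (st : List Char × Bool) :
    tks (xs ++ [c]) st = tkStep (tks xs st) c := by
  simp [tks, List.foldl_append]

lemma tks_snoc_delim {c : Char} (h : pvDelim c = true) (xs : List Char) (st : List Char × Bool) :
    tks (xs ++ [c]) st = ([], true) := by
  rw [tks_snoc]; simp [tkStep, h]

lemma emit_cons_open (xs : List Char) :
    emit ('(' :: xs) ([], true) = emit xs ([], true) := by
  simp [emit, emitC, tkStep, pvDelim]

lemma tks_cons_open (xs : List Char) :
    tks ('(' :: xs) ([], true) = tks xs ([], true) := by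
  simp [tks, tkStep, pvDelim]

-- A's tokenizer loop is tks together with the ordered-dedup of the emitted tokens
lemma enStep_eq (name : List Char) (names : PySem.Set String) (mode : Bool) (c : Char) :
    enStep (name, names, mode) c =
      ((tkStep (name, mode) c).1, (emitC (name, mode) c).foldl PySem.Set.add names,
        (tkStep (name, mode) c).2) := by
  by_cases hd : pvDelim c = true
  · have hk : pvKeep c = false := by
      unfold pvKeep; simp [hd]
    simp only [enStep, tkStep, emitC, hd, hk, Bool.true_and, if_true, Bool.and_false,
      Bool.false_eq_true, if_false]
    cases hn : name.isEmpty <;> simp [List.foldl]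
  · simp only [Bool.not_eq_true] at hd
    simp [enStep, tkStep, emitC, hd]
    split_ifs <;> simp_all

lemma en_fold (cs : List Char) (name : List Char) (names : PySem.Set String) (mode : Bool) :
    cs.foldl enStep (name, names, mode) =
      ((tks cs (name, mode)).1, (emit cs (name, mode)).foldl PySem.Set.add names,
        (tks cs (name, mode)).2) := by
  induction cs generalizing name names mode with
  | nil => simp [tks, emit]
  | cons c cs ih =>
      rw [List.foldl_cons, enStep_eq, ih]
      simp [tks, emit, List.foldl_append]

lemma extractnames_eq (cs : List Char) :
    extractnames cs = (emitAll cs).foldl PySem.Set.add [] := by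
  unfold extractnames emitAll
  rw [en_fold, List.foldl_append]
  simp [flushT]
  rcases h : tks cs ([], true) with ⟨n, m⟩
  cases hn : n.isEmpty <;>
    simp_all [List.isEmpty_iff, List.foldl, PySem.Set.add]

-- flushing the pending name is appending flushT
lemma flush_append (t : List String) (l : List Char) (m : Bool) :
    (if l = [] then t else t ++ [String.ofList l]) = t ++ flushT (l, m) := by
  cases l <;> simp [flushT]

lemma flush_append' (t : List String) (l : List Char) (m : Bool) :
    (if l.isEmpty then t else t ++ [String.ofList l]) = t ++ flushT (l, m) := by
  cases l <;> simp [flushT]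

lemma bStep_not_delim {c : Char} (h : pvDelim c = false) (st : BSt) :
    bStep st c = ⟨(tkStep (st.name, st.mode) c).1, (tkStep (st.name, st.mode) c).2,
      st.toks, st.stack, st.splits⟩ := by
  simp [bStep, tkStep, h]
  split_ifs <;> simp_all

lemma bStep_open (st : BSt) :
    bStep st '(' = ⟨[], true, st.toks ++ flushT (st.name, st.mode),
      (st.toks ++ flushT (st.name, st.mode)).length :: st.stack, st.splits⟩ := by
  simp [bStep, pvDelim, flush_append st.toks st.name st.mode]

lemma bStep_comma (st : BSt) :
    bStep st ',' = ⟨[], true, st.toks ++ flushT (st.name, st.mode), st.stack, st.splits⟩ := by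
  simp [bStep, pvDelim, flush_append st.toks st.name st.mode]

lemma bStep_close (st : BSt) (s : Nat) (rest : List Nat) (h : st.stack = s :: rest) :
    bStep st ')' = ⟨[], true, st.toks ++ flushT (st.name, st.mode), rest,
      st.splits ++ [PySem.Set.ofList ((st.toks ++ flushT (st.name, st.mode)).drop s)]⟩ := by
  simp [bStep, pvDelim, flush_append st.toks st.name st.mode, h]

lemma rnStep_open (cs : List Char) (all : PySem.Set String)
    (st : List Nat × PySem.Set (List String × List String)) (i : Nat) :
    rnStep cs all st ('(', i) = (i :: st.1, st.2) := by
  simp [rnStep]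

lemma rnStep_other (cs : List Char) (all : PySem.Set String)
    (st : List Nat × PySem.Set (List String × List String)) {c : Char} (i : Nat)
    (h1 : c ≠ '(') (h2 : c ≠ ')') :
    rnStep cs all st (c, i) = st := by
  simp [rnStep, h1, h2]

lemma rnStep_close (cs : List Char) (all : PySem.Set String)
    (st : List Nat × PySem.Set (List String × List String)) (i j : Nat) (rest : List Nat)
    (h : st.1 = j :: rest) :
    rnStep cs all st (')', i) =
      (rest, PySem.Set.add st.2 (extractnames ((cs.drop j).take (i - j)),
        PySem.Set.diff all (extractnames ((cs.drop j).take (i - j))))) := by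
  simp [rnStep, h]

-- the token list recorded for a closed bracket is exactly extractnames of A's slice
lemma close_slice (cs : List Char) (n j : Nat) (hj : j < n) (hn : n ≤ cs.length)
    (hcj : cs[j]? = some '(') :
    extractnames ((cs.drop j).take (n - j)) =
      PySem.Set.ofList ((emit (cs.take n) ([], true) ++ flushT (tks (cs.take n) ([], true))).drop
        (emit (cs.take (j+1)) ([], true)).length) := by
  have hjl : j < cs.length := lt_of_lt_of_le hj hn
  have hslice : (cs.drop j).take (n - j) = (cs.take n).drop j := (List.drop_take).symm
  have hpj : (cs.take n)[j]? = some '(' := by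
    rw [List.getElem?_take_of_lt hj]; exact hcj
  have hjp : j < (cs.take n).length := by simp; omega
  have hdropj : (cs.take n).drop j = '(' :: (cs.take n).drop (j+1) := by
    rw [List.drop_eq_getElem_cons hjp]
    have : (cs.take n)[j] = '(' := by
      have := List.getElem?_eq_getElem hjp
      rw [hpj] at this; exact (Option.some_inj.mp this).symm
    rw [this]
  have htk : cs.take (j+1) = (cs.take n).take (j+1) := by
    rw [List.take_take]; congr 1; omega
  have hsplit : cs.take n = (cs.take n).take (j+1) ++ (cs.take n).drop (j+1) :=
    (List.take_append_drop _ _).symm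
  have htkj : (cs.take n).take (j+1) = (cs.take n).take j ++ ['('] := by
    have : j < (cs.take n).length := hjp
    rw [List.take_succ_eq_append_getElem this]
    congr 1
    have h2 := List.getElem?_eq_getElem this
    rw [hpj] at h2
    simp [← Option.some_inj.mp h2]
  have htks1 : tks ((cs.take n).take (j+1)) ([], true) = ([], true) := by
    rw [htkj]; exact tks_snoc_delim (by decide) _ _
  have hemit : emit (cs.take n) ([], true) =
      emit ((cs.take n).take (j+1)) ([], true) ++ emit ((cs.take n).drop (j+1)) ([], true) := by
    conv_lhs => rw [hsplit]
    rw [emit_append, htks1]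
  have htks2 : tks (cs.take n) ([], true) = tks ((cs.take n).drop (j+1)) ([], true) := by
    conv_lhs => rw [hsplit]
    rw [tks_append, htks1]
  rw [hslice, extractnames_eq, ← PySem.Set.ofList_eq_foldl]
  congr 1
  rw [hemit, htks2, htk, List.append_assoc, List.drop_left]
  unfold emitAll
  rw [hdropj, emit_cons_open, tks_cons_open]

-- the single-pass invariant tying B's state and A's loop state together over any prefix
lemma main_inv (cs : List Char) (all : PySem.Set String)
    (r0 : PySem.Set (List String × List String)) (n : Nat) (hn : n ≤ cs.length)
    (hbal : ∀ k, k ≤ n → ((cs.take k).count ')') ≤ (cs.take k).count '(') :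
    (((cs.take n).foldl bStep ⟨[], true, [], [], []⟩).name,
      ((cs.take n).foldl bStep ⟨[], true, [], [], []⟩).mode) = tks (cs.take n) ([], true) ∧
    ((cs.take n).foldl bStep ⟨[], true, [], [], []⟩).toks = emit (cs.take n) ([], true) ∧
    ((cs.take n).foldl bStep ⟨[], true, [], [], []⟩).stack =
      ((cs.take n).zipIdx.foldl (rnStep cs all) ([], r0)).1.map
        (fun j => (emit (cs.take (j+1)) ([], true)).length) ∧
    (∀ j ∈ ((cs.take n).zipIdx.foldl (rnStep cs all) ([], r0)).1,
        j < n ∧ cs[j]? = some '(') ∧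
    ((cs.take n).zipIdx.foldl (rnStep cs all) ([], r0)).1.length + (cs.take n).count ')' =
      (cs.take n).count '(' ∧
    ((cs.take n).zipIdx.foldl (rnStep cs all) ([], r0)).2 =
      ((cs.take n).foldl bStep ⟨[], true, [], [], []⟩).splits.foldl
        (fun r l => PySem.Set.add r (l, PySem.Set.diff all l)) r0 := by
  induction n with
  | zero => simp [tks, emit]
  | succ n ih =>
    have hnl : n < cs.length := by omega
    obtain ⟨ih1, ih2, ih3, ih4, ih5, ih6⟩ :=
      ih (by omega) (fun k hk => hbal k (by omega))
    have hsnoc : cs.take (n+1) = cs.take n ++ [cs[n]] :=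
      List.take_succ_eq_append_getElem hnl
    have hlen : (cs.take n).length = n := by simp; omega
    have hzip : (cs.take (n+1)).zipIdx = (cs.take n).zipIdx ++ [(cs[n], n)] := by
      rw [hsnoc, List.zipIdx_append]
      simp [hlen, List.zipIdx]
    set B := (cs.take n).foldl bStep ⟨[], true, [], [], []⟩ with hB
    set SA := (cs.take n).zipIdx.foldl (rnStep cs all) ([], r0) with hSA
    have hfoldB : (cs.take (n+1)).foldl bStep ⟨[], true, [], [], []⟩ = bStep B (cs[n]) := by
      rw [hsnoc, List.foldl_append, ← hB]; rfl
    have hfoldA : (cs.take (n+1)).zipIdx.foldl (rnStep cs all) ([], r0) =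
        rnStep cs all SA (cs[n], n) := by
      rw [hzip, List.foldl_append, ← hSA]; rfl
    by_cases hop : cs[n] = '('
    · -- '(' : push on both sides
      have hd : pvDelim '(' = true := by decide
      have htoks : B.toks ++ flushT (B.name, B.mode) = emit (cs.take (n+1)) ([], true) := by
        rw [hsnoc, hop, emit_snoc, emitC_delim hd, ← ih1, ← ih2]
      rw [hfoldA, hfoldB, hop, rnStep_open, bStep_open]
      refine ⟨?_, ?_, ?_, ?_, ?_, ?_⟩
      · rw [hsnoc, hop, tks_snoc_delim hd]
      · exact htoks
      · simp only [List.map_cons, ← ih3, htoks]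
      · intro j hj
        rcases List.mem_cons.mp hj with h | h
        · subst h; exact ⟨by omega, by rw [List.getElem?_eq_getElem hnl, hop]⟩
        · exact ⟨by have := (ih4 j h).1; omega, (ih4 j h).2⟩
      · rw [hsnoc, hop]
        simp only [List.count_append, List.length_cons]
        simp
        omega
      · exact ih6
    · by_cases hcl : cs[n] = ')'
      · -- ')' : pop, record the closed bracket
        have hd : pvDelim ')' = true := by decide
        have hcnt : (cs.take (n+1)).count ')' ≤ (cs.take (n+1)).count '(' := hbal (n+1) le_rfl
        rw [hsnoc, hcl] at hcnt
        simp [List.count_append] at hcnt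
        obtain ⟨j, rest, hj⟩ : ∃ j rest, SA.1 = j :: rest := by
          rcases h : SA.1 with _ | ⟨j, rest⟩
          · rw [h] at ih5; simp at ih5; omega
          · exact ⟨j, rest, rfl⟩
        obtain ⟨hjn, hjc⟩ := ih4 j (by rw [hj]; exact List.mem_cons_self ..)
        have htoks : B.toks ++ flushT (B.name, B.mode) = emit (cs.take (n+1)) ([], true) := by
          rw [hsnoc, hcl, emit_snoc, emitC_delim hd, ← ih1, ← ih2]
        have hstack : B.stack = (emit (cs.take (j+1)) ([], true)).length ::
            rest.map (fun j => (emit (cs.take (j+1)) ([], true)).length) := by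
          rw [ih3, hj]; rfl
        have hleft : extractnames ((cs.drop j).take (n - j)) =
            PySem.Set.ofList ((B.toks ++ flushT (B.name, B.mode)).drop
              (emit (cs.take (j+1)) ([], true)).length) := by
          rw [close_slice cs n j hjn (by omega) hjc, ih2, ih1]
        rw [hfoldA, hfoldB, hcl, rnStep_close cs all SA n j rest hj,
          bStep_close B _ _ hstack]
        refine ⟨?_, ?_, ?_, ?_, ?_, ?_⟩
        · rw [hsnoc, hcl, tks_snoc_delim hd]
        · exact htoks
        · rfl
        · intro j' hj'
          have : j' ∈ SA.1 := by rw [hj]; exact List.mem_cons_of_mem _ hj'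
          exact ⟨by have := (ih4 j' this).1; omega, (ih4 j' this).2⟩
        · rw [hsnoc, hcl]
          simp only [List.count_append]
          simp
          rw [hj] at ih5; simp at ih5
          omega
        · rw [List.foldl_append, ih6, hleft]
          rfl
      · by_cases hcm : cs[n] = ','
        · -- ',' : flush only
          have hd : pvDelim ',' = true := by decide
          have htoks : B.toks ++ flushT (B.name, B.mode) = emit (cs.take (n+1)) ([], true) := by
            rw [hsnoc, hcm, emit_snoc, emitC_delim hd, ← ih1, ← ih2]
          rw [hfoldA, hfoldB, hcm, rnStep_other cs all SA n (by decide) (by decide),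
            bStep_comma]
          refine ⟨?_, ?_, ?_, ?_, ?_, ?_⟩
          · rw [hsnoc, hcm, tks_snoc_delim hd]
          · exact htoks
          · exact ih3
          · exact fun j hj => ⟨by have := (ih4 j hj).1; omega, (ih4 j hj).2⟩
          · rw [hsnoc, hcm]
            simp only [List.count_append]
            simp
            omega
          · exact ih6
        · -- ordinary character
          have hd : pvDelim cs[n] = false := by
            simp [pvDelim, hop, hcl, hcm]
          rw [hfoldA, hfoldB, rnStep_other cs all SA n hop hcl, bStep_not_delim hd]
          refine ⟨?_, ?_, ?_, ?_, ?_, ?_⟩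
          · rw [hsnoc, tks_snoc, ← ih1]
          · rw [hsnoc, emit_snoc, emitC_not_delim hd, ih2, List.append_nil]
          · exact ih3
          · exact fun j hj => ⟨by have := (ih4 j hj).1; omega, (ih4 j hj).2⟩
          · rw [hsnoc]
            simp only [List.count_append]
            simp [hop, hcl]
            omega
          · exact ih6

-- ===== VERDICT (by name: the statement is the Claim_ definition above) =====
theorem readnewick_spec : Claim_equal_readnewick := by
  intro newick hdom hpre
  unfold Spec_readnewick readnewick readnewick_alt
  have hbal : ∀ k, k ≤ newick.toList.length →
      ((newick.toList.take k).count ')') ≤ (newick.toList.take k).count '(' := by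
    intro k hk
    exact hpre k (List.mem_range.mpr (by omega))
  obtain ⟨h1, h2, h3, h4, h5, h6⟩ := main_inv newick.toList (extractnames newick.toList)
    ((extractnames newick.toList).foldl
      (fun r nm => PySem.Set.add r ([nm], PySem.Set.diff (extractnames newick.toList) [nm])) [])
    newick.toList.length le_rfl hbal
  rw [List.take_length] at h1 h2 h6
  set cs := newick.toList with hcs
  set B := cs.foldl bStep ⟨[], true, [], [], []⟩ with hBdef
  have htoks : (if B.name.isEmpty then B.toks else B.toks ++ [String.ofList B.name]) =
      emitAll cs := by
    rw [flush_append' B.toks B.name B.mode, h2, h1]; rfl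
  have hall : PySem.Set.ofList
      (if B.name.isEmpty then B.toks else B.toks ++ [String.ofList B.name]) =
      extractnames cs := by
    rw [htoks, extractnames_eq, PySem.Set.ofList_eq_foldl]
  dsimp only
  rw [hall, h6]
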